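-- pv_equiv track=rewrite | github.com/caboooom/Algorithm | 프로그래머스/unrated/132267. 콜라 문제/콜라 문제.py | solution
-- ===== SOURCE A (Python) =====
-- def solution(a, b, n):
--     answer = 0
--     cokes = n
--     while cokes >= a:
--         newcokes = (cokes//a)*b
--         cokes = cokes%a + newcokes
--         answer += newcokes
--     return answer
-- ===== SOURCE B (Python) =====
-- def solution(a, b, n):
--     # Closed form: each exchange turns a empties into b cokes, a net loss of
--     # (a - b) bottles; exchanging is possible while at least a bottles remain,
--     # so the number of cokes received in total is (n - b) // (a - b) * b.
--     return 0 if n < a else (n - b) // (a - b) * b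
-- ===== Notes on version B (the rewrite author's own statement) =====
-- stated objective: alternative
-- what changed: Replaced the simulation loop (repeatedly exchange cokes//a empties and accumulate) by the closed-form arithmetic expression (n-b)//(a-b)*b for n>=a, else 0.
-- outside the precondition, e.g. on solution(5, -3, 12): A returns -6, B returns -3
import Mathlib
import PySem

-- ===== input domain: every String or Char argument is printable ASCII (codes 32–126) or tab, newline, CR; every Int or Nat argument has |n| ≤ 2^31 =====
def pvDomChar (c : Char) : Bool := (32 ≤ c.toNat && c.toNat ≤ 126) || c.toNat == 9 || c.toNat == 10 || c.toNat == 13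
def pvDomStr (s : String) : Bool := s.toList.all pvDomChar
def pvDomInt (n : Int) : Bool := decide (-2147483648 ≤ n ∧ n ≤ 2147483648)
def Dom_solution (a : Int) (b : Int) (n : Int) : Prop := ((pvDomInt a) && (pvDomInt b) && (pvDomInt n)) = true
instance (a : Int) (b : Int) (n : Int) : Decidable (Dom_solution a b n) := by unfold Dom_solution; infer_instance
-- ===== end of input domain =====

-- B replaces A's exchange-simulation loop by the closed-form expression (n-b)//(a-b)*b (alternative).

-- ===== PORT A =====
-- fuel makes the while-loop total; Pre_solution guarantees n.toNat + 1 iterations suffice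
def solutionLoop (fuel : Nat) (a b cokes answer : Int) : Int :=
  match fuel with
  | 0 => answer
  | Nat.succ f =>
    if a ≤ cokes then
      let newcokes := PySem.Int.floordiv cokes a * b
      solutionLoop f a b (PySem.Int.mod cokes a + newcokes) (answer + newcokes)
    else answer

def solution (a : Int) (b : Int) (n : Int) : Int :=
  solutionLoop (n.toNat + 1) a b n 0

-- ===== PORT B =====
def solution_alt (a : Int) (b : Int) (n : Int) : Int :=
  if n < a then 0 else PySem.Int.floordiv (n - b) (a - b) * b

-- ===== PRECONDITION & SPEC =====
-- Pre_ keeps the problem's natural domain 0 ≤ b < a (plus all trivial inputs n < a, where the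
-- loop never runs). Excluded while A still returns: b < 0 with n ≥ a, outside the natural
-- domain (a negative bottle reward), where A's loop total is an artefact of the simulation.
-- Also excluded: a ≤ b with n ≥ a, where A loops forever or (a = 0) raises ZeroDivisionError.
def Pre_solution (a : Int) (b : Int) (n : Int) : Prop := (0 ≤ b ∧ b < a) ∨ n < a
instance (a : Int) (b : Int) (n : Int) : Decidable (Pre_solution a b n) := by unfold Pre_solution; infer_instance
def pvWitness_solution : Int × Int × Int := (3, 1, 10)

def Spec_solution (a : Int) (b : Int) (n : Int) (out : Int) : Prop := out = solution_alt a b n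
instance (a : Int) (b : Int) (n : Int) (out : Int) : Decidable (Spec_solution a b n out) := by unfold Spec_solution; infer_instance

-- ===== CLAIM (what is proved, stated in full; the proofs are below) =====
def Claim_equal_solution : Prop := ∀ (a : Int) (b : Int) (n : Int), Dom_solution a b n → Pre_solution a b n → Spec_solution a b n (solution a b n)

-- ===== LEMMAS AND PROOFS =====

theorem solutionLoop_closed (a b : Int) (hb : 0 ≤ b) (hba : b < a) :
    ∀ (fuel : Nat) (c ans : Int), c.toNat < fuel →
      solutionLoop fuel a b c ans = ans + solution_alt a b c := by
  intro fuel
  induction fuel with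
  | zero => intro c ans h; omega
  | succ f ih =>
    intro c ans hfuel
    by_cases hc : a ≤ c
    · have ha : 0 < a := by omega
      have hfe : PySem.Int.floordiv c a = c / a := PySem.Int.floordiv_eq_ediv_of_pos ha
      have hme : PySem.Int.mod c a = c % a := PySem.Int.mod_eq_emod_of_pos ha
      set q := c / a with hqdef
      have hq1 : 1 ≤ q := (Int.le_ediv_iff_mul_le ha).mpr (by omega)
      have hmod0 : 0 ≤ c % a := Int.emod_nonneg c (by omega)
      have hmodlt : c % a < a := Int.emod_lt_of_pos c ha
      have hdecomp : q * a + c % a = c := by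
        have h := Int.mul_ediv_add_emod c a
        rw [hqdef]; linarith
      set c' := c % a + q * b with hc'def
      have hc'b : b ≤ c' := by nlinarith
      have hc'lt : c' < c := by nlinarith
      have h0c' : 0 ≤ c' := le_trans hb hc'b
      have hc'fuel : c'.toNat < f := by
        have h1 : c'.toNat < c.toNat := by omega
        omega
      have hstep : solutionLoop (f + 1) a b c ans
          = solutionLoop f a b c' (ans + q * b) := by
        simp only [solutionLoop, if_pos hc, hfe, hme]
        rw [hc'def]
      rw [hstep, ih c' (ans + q * b) hc'fuel]
      -- remains: ans + q*b + F c' = ans + F c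
      have hab : (0:Int) < a - b := by omega
      have hFc : solution_alt a b c = PySem.Int.floordiv (c - b) (a - b) * b := by
        simp [solution_alt, if_neg (by omega : ¬ c < a)]
      have hfe2 : PySem.Int.floordiv (c - b) (a - b) = (c - b) / (a - b) :=
        PySem.Int.floordiv_eq_ediv_of_pos hab
      have hsplit : (c - b) / (a - b) = (c' - b) / (a - b) + q := by
        have h1 : c - b = (c' - b) + q * (a - b) := by rw [hc'def]; linarith [hdecomp]
        rw [h1, Int.add_mul_ediv_right _ _ (by omega : a - b ≠ 0)]
      by_cases hc2 : a ≤ c'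
      · have hfe3 : PySem.Int.floordiv (c' - b) (a - b) = (c' - b) / (a - b) :=
          PySem.Int.floordiv_eq_ediv_of_pos hab
        have hFc' : solution_alt a b c' = (c' - b) / (a - b) * b := by
          simp [solution_alt, if_neg (by omega : ¬ c' < a), hfe3]
        rw [hFc', hFc, hfe2, hsplit]; ring
      · have hFc' : solution_alt a b c' = 0 := by
          simp [solution_alt, if_pos (by omega : c' < a)]
        have hzero : (c' - b) / (a - b) = 0 :=
          Int.ediv_eq_zero_of_lt (by omega) (by omega)
        rw [hFc', hFc, hfe2, hsplit, hzero]; ring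
    · have hstop : solutionLoop (f + 1) a b c ans = ans := by
        simp [solutionLoop, if_neg hc]
      rw [hstop]
      simp [solution_alt, if_pos (by omega : c < a)]

-- ===== VERDICT (by name: the statement is the Claim_ definition above) =====
theorem solution_spec : Claim_equal_solution := by
  intro a b n _ hpre
  unfold Spec_solution solution
  rcases hpre with ⟨hb, hba⟩ | hna
  · rw [solutionLoop_closed a b hb hba (n.toNat + 1) n 0 (by omega)]
    ring
  · simp [solutionLoop, if_neg (by omega : ¬ a ≤ n), solution_alt, if_pos hna]
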